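-- pv_equiv track=rewrite | github.com/RUPALIENTHUSIAST/python-coding-challenges | challenge-21/solution.py | generate_selected_squares
-- ===== SOURCE A (Python) =====
-- def generate_selected_squares(n):
--     """
--     Generate the series: 1, 4, 9, 25, 36, 49, 81 ... up to N terms
--     (skipping 16, 64 based on pattern)
--     """
--     if n <= 0:
--         raise ValueError("N must be positive.")
--
--     series = []
--     num = 1
--
--     while len(series) < n:
--         square = num * num
--         # Skip squares where num is 4, 8, 12 ... (pattern observation)
--         if num % 4 != 0:
--             series.append(square)
--         num += 1
--
--     return series
-- ===== SOURCE B (Python) =====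
-- def generate_selected_squares(n):
--     """
--     Generate the series: 1, 4, 9, 25, 36, 49, 81 ... up to N terms
--     (skipping squares of multiples of 4), by a closed-form index mapping.
--     """
--     if n <= 0:
--         raise ValueError("N must be positive.")
--     return [(4 * (i // 3) + (i % 3) + 1) ** 2 for i in range(n)]
-- ===== Notes on version B (the rewrite author's own statement) =====
-- stated objective: simpler
-- what changed: Replaces the scan-and-skip while-loop (testing every integer for divisibility by 4) with a direct closed-form mapping: the i-th kept base is 4*(i//3)+(i%3)+1, emitted as a single list comprehension.
import Mathlib
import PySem

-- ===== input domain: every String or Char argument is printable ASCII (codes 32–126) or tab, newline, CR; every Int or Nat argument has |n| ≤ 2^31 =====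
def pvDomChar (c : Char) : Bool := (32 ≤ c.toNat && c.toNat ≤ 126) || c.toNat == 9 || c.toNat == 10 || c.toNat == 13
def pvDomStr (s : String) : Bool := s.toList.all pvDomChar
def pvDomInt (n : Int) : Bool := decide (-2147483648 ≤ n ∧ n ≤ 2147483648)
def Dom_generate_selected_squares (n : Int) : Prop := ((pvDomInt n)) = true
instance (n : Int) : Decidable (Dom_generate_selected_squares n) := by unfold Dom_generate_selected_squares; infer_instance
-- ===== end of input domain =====

-- B replaces A's scan-and-skip while-loop with a closed-form index mapping (simpler, same cost).


-- ===== PORT A =====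
-- A's while-loop: append num*num when num % 4 ≠ 0, until the series has n elements.
def asqLoop (n : Int) (series : List Int) (num : Int) : List Int :=
  if _h : (series.length : Int) < n then
    if PySem.Int.mod num 4 ≠ 0 then
      asqLoop n (series ++ [num * num]) (num + 1)
    else
      asqLoop n series (num + 1)
  else series
termination_by 2 * (n - series.length).toNat + (if PySem.Int.mod num 4 = 0 then 1 else 0)
decreasing_by
  all_goals
    simp only [PySem.Int.mod_eq_emod_of_pos (by norm_num : (0:Int) < 4),
      List.length_append, List.length_singleton] at *
    split_ifs <;> omega

def generate_selected_squares (n : Int) : List Int :=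
  -- Python raises ValueError for n ≤ 0 (excluded by Pre_); the loop body below is A's loop verbatim.
  asqLoop n [] 1

-- ===== PORT B =====
def generate_selected_squares_alt (n : Int) : List Int :=
  (PySem.List.pyRange 0 n 1).map (fun i =>
    let num := 4 * PySem.Int.floordiv i 3 + PySem.Int.mod i 3 + 1
    num * num)

-- ===== PRECONDITION & SPEC =====
-- Python A raises ValueError for n ≤ 0; exactly those inputs are excluded.
def Pre_generate_selected_squares (n : Int) : Prop := 0 < n
instance (n : Int) : Decidable (Pre_generate_selected_squares n) := by unfold Pre_generate_selected_squares; infer_instance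
def pvWitness_generate_selected_squares : Int := (5)

def Spec_generate_selected_squares (n : Int) (out : List Int) : Prop := out = generate_selected_squares_alt n
instance (n : Int) (out : List Int) : Decidable (Spec_generate_selected_squares n out) := by unfold Spec_generate_selected_squares; infer_instance

-- ===== CLAIM (what is proved, stated in full; the proofs are below) =====
def Claim_equal_generate_selected_squares : Prop := ∀ (n : Int), Dom_generate_selected_squares n → Pre_generate_selected_squares n → Spec_generate_selected_squares n (generate_selected_squares n)

-- ===== LEMMAS AND PROOFS =====

-- the i-th kept base and its square
def pvBase (k : Nat) : Int := 4 * ((k / 3 : Nat) : Int) + ((k % 3 : Nat) : Int) + 1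
def pvSq (k : Nat) : Int := pvBase k * pvBase k

theorem pvBase_mod (k : Nat) : pvBase k % 4 = (k % 3 : Nat) + 1 := by
  unfold pvBase
  omega

theorem pvBase_succ_lt (k : Nat) (h : k % 3 < 2) : pvBase (k + 1) = pvBase k + 1 := by
  unfold pvBase
  omega

theorem pvBase_succ_eq (k : Nat) (h : k % 3 = 2) : pvBase (k + 1) = pvBase k + 2 := by
  unfold pvBase
  omega

theorem asqLoop_inv : ∀ (m : Nat) (n : Int) (k : Nat), (k : Int) ≤ n → m = (n - k).toNat →
    asqLoop n (List.map pvSq (List.range k)) (pvBase k) = List.map pvSq (List.range n.toNat) := by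
  intro m
  induction m with
  | zero =>
    intro n k hk hm
    have hn : n = k := by omega
    rw [asqLoop]
    simp [hn]
  | succ m ih =>
    intro n k hk hm
    have hkn : (k : Int) < n := by omega
    have hmod4 : PySem.Int.mod (pvBase k) 4 = (k % 3 : Nat) + 1 := by
      rw [PySem.Int.mod_eq_emod_of_pos (by norm_num : (0:Int) < 4), pvBase_mod]
    rw [asqLoop]
    have hlen : ((List.map pvSq (List.range k)).length : Int) < n := by simpa using hkn
    rw [dif_pos hlen, if_pos (by rw [hmod4]; omega)]
    have hser : List.map pvSq (List.range k) ++ [pvBase k * pvBase k] = List.map pvSq (List.range (k + 1)) := by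
      rw [List.range_succ, List.map_append]; rfl
    rw [hser]
    by_cases h3 : k % 3 < 2
    · rw [show pvBase k + 1 = pvBase (k + 1) from (pvBase_succ_lt k h3).symm]
      exact ih n (k + 1) (by omega) (by omega)
    · have h2 : k % 3 = 2 := by omega
      -- next num is a multiple of 4: one skip step (or immediate exit)
      rw [asqLoop]
      have hmodskip : PySem.Int.mod (pvBase k + 1) 4 = 0 := by
        rw [PySem.Int.mod_eq_emod_of_pos (by norm_num : (0:Int) < 4)]
        have := pvBase_mod k
        omega
      by_cases hk1 : ((k : Int) + 1) < n
      · have hlen1 : ((List.map pvSq (List.range (k+1))).length : Int) < n := by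
          simpa using hk1
        rw [dif_pos hlen1, if_neg (by push Not; exact hmodskip)]
        rw [show pvBase k + 1 + 1 = pvBase (k + 1) by rw [pvBase_succ_eq k h2]; ring]
        exact ih n (k + 1) (by omega) (by omega)
      · have hn : n = (k : Int) + 1 := by omega
        rw [dif_neg (by simp [hn])]
        have hnt : n.toNat = k + 1 := by omega
        rw [hnt]

theorem altEq (n : Int) (_hn : 0 ≤ n) :
    generate_selected_squares_alt n = List.map pvSq (List.range n.toNat) := by
  unfold generate_selected_squares_alt
  rw [PySem.List.pyRange_one, List.map_map]
  simp only [sub_zero]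
  refine List.map_congr_left (fun k _ => ?_)
  simp only [Function.comp_apply, zero_add]
  show (4 * PySem.Int.floordiv (k:Int) 3 + PySem.Int.mod (k:Int) 3 + 1) * _ = _
  unfold pvSq pvBase
  have hf : PySem.Int.floordiv (k:Int) 3 = ((k / 3 : Nat) : Int) := by
    exact_mod_cast PySem.Int.floordiv_natCast k 3
  have hm : PySem.Int.mod (k:Int) 3 = ((k % 3 : Nat) : Int) := by
    exact_mod_cast PySem.Int.mod_natCast k 3
  rw [hf, hm]

-- ===== VERDICT (by name: the statement is the Claim_ definition above) =====
theorem generate_selected_squares_spec : Claim_equal_generate_selected_squares := by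
  intro n _ hpre
  unfold Spec_generate_selected_squares generate_selected_squares
  have h0 : asqLoop n (List.map pvSq (List.range 0)) (pvBase 0) = List.map pvSq (List.range n.toNat) :=
    asqLoop_inv (n - 0).toNat n 0 (by exact_mod_cast le_of_lt hpre) rfl
  simp only [List.range_zero, List.map_nil] at h0
  rw [altEq n (le_of_lt hpre)]
  rw [← h0]
  rfl
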